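-- pv_equiv track=rewrite | github.com/eyamil/BIMM-181 | 6. patterns pt. 2/62. burrows wheeler matching.py | count_patterns_in_bwt
-- ===== SOURCE A (Python) =====
-- def count_patterns_in_bwt(bwt, patterns):
--     forward_perm = inverse(last_to_first(bwt))
--     sorted_chars = [char for char in bwt]
--     sorted_chars.sort()
--     match_counter = []
--     for pattern in patterns:
--         match_counter.append(count_pattern_matches(pattern, forward_perm, sorted_chars))
--     return(match_counter)
--
-- def count_pattern_matches(pattern, forward_perm, sorted_chars):
--     top = 0
--     bottom = len(forward_perm) - 1
--     for pos in range(len(pattern) - 1, -1, -1):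
--         char = pattern[pos]
--         candidates = list(filter(lambda x : sorted_chars[x] == char, forward_perm[top : bottom + 1]))
--         if candidates:
--             top = min(candidates)
--             bottom = max(candidates)
--         else:
--             return(0)
--     return(bottom - top + 1)
--
-- def last_to_first(bwt):
--     numbered_bwt = []
--     for i in range(len(bwt)):
--         numbered_bwt.append((bwt[i], i))
--     numbered_bwt.sort(key = lambda x : x[0])
--     permutation = [x[1] for x in numbered_bwt]
--     return(permutation)
--
-- def inverse(permutation):
--     inv = [0] * len(permutation)
--     for i in range(len(permutation)):
--         inv[permutation[i]] = i
--     return(inv)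
-- ===== SOURCE B (Python) =====
-- def count_patterns_in_bwt(bwt, patterns):
--     # FM-index: per-character sorted occurrence lists + first-occurrence offsets;
--     # each backward-search step is two binary searches instead of a scan of the row range.
--     n = len(bwt)
--     occ = {}
--     for i in range(n):
--         occ.setdefault(bwt[i], []).append(i)
--     first = {}
--     total = 0
--     for ch in sorted(occ):
--         first[ch] = total
--         total += len(occ[ch])
--     results = []
--     for pattern in patterns:
--         top = 0
--         bottom = n - 1
--         for pos in range(len(pattern) - 1, -1, -1):
--             ch = pattern[pos]
--             if ch not in occ:
--                 top, bottom = 0, -1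
--                 break
--             positions = occ[ch]
--             lo = _bisect_left(positions, top)
--             hi = _bisect_left(positions, bottom + 1)
--             if hi <= lo:
--                 top, bottom = 0, -1
--                 break
--             top = first[ch] + lo
--             bottom = first[ch] + hi - 1
--         results.append(bottom - top + 1)
--     return results
--
-- def _bisect_left(a, x):
--     lo = 0
--     hi = len(a)
--     while lo < hi:
--         mid = (lo + hi) // 2
--         if a[mid] < x:
--             lo = mid + 1
--         else:
--             hi = mid
--     return lo
-- ===== Notes on version B (the rewrite author's own statement) =====
-- stated objective: faster
-- what changed: B replaces A's per-step linear scan of the whole current row range (filter + min + max over a slice of the inverse last-to-first permutation) by an FM-index: per-character sorted occurrence lists plus first-occurrence offsets built once, with each backward-search step reduced to two binary searches.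
import Mathlib
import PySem

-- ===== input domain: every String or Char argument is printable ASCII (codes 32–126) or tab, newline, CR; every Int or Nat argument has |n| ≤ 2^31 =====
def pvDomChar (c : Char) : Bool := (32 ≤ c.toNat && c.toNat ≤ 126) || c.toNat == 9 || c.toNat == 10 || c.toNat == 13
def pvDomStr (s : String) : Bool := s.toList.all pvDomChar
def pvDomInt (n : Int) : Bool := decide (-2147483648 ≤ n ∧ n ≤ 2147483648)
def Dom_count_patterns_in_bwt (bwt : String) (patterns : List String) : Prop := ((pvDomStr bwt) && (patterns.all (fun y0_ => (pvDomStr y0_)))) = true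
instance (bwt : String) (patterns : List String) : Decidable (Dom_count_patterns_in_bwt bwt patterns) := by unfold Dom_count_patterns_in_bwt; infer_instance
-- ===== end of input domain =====

-- B replaces A's per-step scan of the whole row range with an FM-index (per-character
-- occurrence lists + first-occurrence offsets, two binary searches per pattern character).

-- ===== PORT A =====
def pyLastToFirst (bwt : List Char) : List Int :=
  let numbered := (PySem.List.pyRange 0 (PySem.List.len bwt) 1).foldl
      (fun acc i => acc ++ [(PySem.List.pyGetD bwt i ' ', i)]) []
  let sortedN := PySem.List.sorted numbered (fun x => x.1) false
  sortedN.map (fun x => x.2)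

def pyInverse (perm : List Int) : List Int :=
  (PySem.List.pyRange 0 (PySem.List.len perm) 1).foldl
    (fun inv i => PySem.List.pySetD inv (PySem.List.pyGetD perm i 0) i)
    (List.replicate perm.length 0)

def pyCpmLoop (fperm : List Int) (schars : List Char) (pat : List Char)
    (positions : List Int) (top bottom : Int) : Int :=
  match positions with
  | [] => bottom - top + 1
  | pos :: rest =>
    let char := PySem.List.pyGetD pat pos ' '
    let candidates := (PySem.List.slice fperm (some top) (some (bottom + 1))).filter
        (fun x => PySem.List.pyGetD schars x ' ' == char)
    if candidates.isEmpty then 0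
    else pyCpmLoop fperm schars pat rest
        ((PySem.List.min? candidates (fun x => x)).getD 0)
        ((PySem.List.max? candidates (fun x => x)).getD 0)

def pyCountPatternMatches (pat : List Char) (fperm : List Int) (schars : List Char) : Int :=
  pyCpmLoop fperm schars pat
    (PySem.List.pyRange (PySem.List.len pat - 1) (-1) (-1)) 0 (PySem.List.len fperm - 1)

def count_patterns_in_bwt (bwt : String) (patterns : List String) : List Int :=
  let fperm := pyInverse (pyLastToFirst bwt.toList)
  let schars := PySem.List.sorted bwt.toList (fun c => c) false
  patterns.foldl (fun acc p => acc ++ [pyCountPatternMatches p.toList fperm schars]) []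

-- ===== PORT B =====
def altBisectLoop (a : List Int) (x : Int) (lo hi : Int) : Int :=
  if h : lo < hi then
    let mid := PySem.Int.floordiv (lo + hi) 2
    if PySem.List.pyGetD a mid 0 < x then altBisectLoop a x (mid + 1) hi
    else altBisectLoop a x lo mid
  else lo
termination_by (hi - lo).toNat
decreasing_by
  · have := PySem.Int.floordiv_two_mid_bounds (lo := lo) (hi := hi) (by omega)
    omega
  · have h2 : PySem.Int.floordiv (lo + hi) 2 < hi := by
      rw [PySem.Int.floordiv_lt_iff_lt_mul (by omega)]; omega
    omega

def altBisect (a : List Int) (x : Int) : Int :=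
  altBisectLoop a x 0 (PySem.List.len a)

def altPatLoop (occd : PySem.Dict Char (List Int)) (firstd : PySem.Dict Char Int)
    (pat : List Char) (positions : List Int) (top bottom : Int) : Int × Int :=
  match positions with
  | [] => (top, bottom)
  | pos :: rest =>
    let ch := PySem.List.pyGetD pat pos ' '
    if occd.contains ch then
      let ps := occd.getD ch []
      let lo := altBisect ps top
      let hi := altBisect ps (bottom + 1)
      if hi ≤ lo then (0, -1)
      else altPatLoop occd firstd pat rest (firstd.getD ch 0 + lo) (firstd.getD ch 0 + hi - 1)
    else (0, -1)

def count_patterns_in_bwt_alt (bwt : String) (patterns : List String) : List Int :=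
  let n : Int := PySem.List.len bwt.toList
  let occd := (PySem.List.pyRange 0 n 1).foldl
      (fun d i => d.modify (PySem.List.pyGetD bwt.toList i ' ') [] (fun l => l ++ [i]))
      PySem.Dict.empty
  let firstTotal := (PySem.List.sorted occd.keys (fun c => c) false).foldl
      (fun (p : PySem.Dict Char Int × Int) ch =>
        (p.1.insert ch p.2, p.2 + PySem.List.len (occd.getD ch [])))
      (PySem.Dict.empty, 0)
  let firstd := firstTotal.1
  patterns.foldl
    (fun acc pat =>
      let tb := altPatLoop occd firstd pat.toList
          (PySem.List.pyRange (PySem.List.len pat.toList - 1) (-1) (-1)) 0 (n - 1)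
      acc ++ [tb.2 - tb.1 + 1]) []

-- ===== PRECONDITION & SPEC =====
def Spec_count_patterns_in_bwt (bwt : String) (patterns : List String) (out : List Int) : Prop := out = count_patterns_in_bwt_alt bwt patterns
instance (bwt : String) (patterns : List String) (out : List Int) : Decidable (Spec_count_patterns_in_bwt bwt patterns out) := by unfold Spec_count_patterns_in_bwt; infer_instance

-- ===== CLAIM (what is proved, stated in full; the proofs are below) =====
def Claim_equal_count_patterns_in_bwt : Prop := ∀ (bwt : String) (patterns : List String), Dom_count_patterns_in_bwt bwt patterns → Spec_count_patterns_in_bwt bwt patterns (count_patterns_in_bwt bwt patterns)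

-- ===== LEMMAS AND PROOFS =====

-- proof-side abbreviations
def alphL : List Char := ((List.range 127).map Char.ofNat).filter (fun c => pvDomChar c)
def idxsN (cs : List Char) (c : Char) : List Nat :=
  (List.range cs.length).filter (fun j => cs.getD j ' ' == c)
def grp (cs : List Char) (c : Char) : List (Char × Int) :=
  (idxsN cs c).map (fun (j : Nat) => (c, (j : Int)))
def canon (cs : List Char) : List (Char × Int) := alphL.flatMap (grp cs)
def ltcN (cs : List Char) (c : Char) : Nat := cs.countP (fun d => decide (d < c))
def cntTake (cs : List Char) (c : Char) (j : Nat) : Nat := (cs.take j).count c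
def rkN (cs : List Char) (j : Nat) : Nat :=
  ltcN cs (cs.getD j ' ') + cntTake cs (cs.getD j ' ') j
def numberedL (cs : List Char) : List (Char × Int) :=
  (List.range cs.length).map (fun j => (cs.getD j ' ', (j : Int)))
def schrL (cs : List Char) : List Char := alphL.flatMap (fun c => List.replicate (cs.count c) c)

theorem alph_pairwise : alphL.Pairwise (· < ·) := by decide
theorem mem_alph {c : Char} (h : pvDomChar c = true) : c ∈ alphL := by
  have hlt : c.toNat < 127 := by
    simp only [pvDomChar, Bool.or_eq_true, Bool.and_eq_true, decide_eq_true_eq, beq_iff_eq] at h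
    omega
  have hmem : c ∈ (List.range 127).map Char.ofNat := by
    refine List.mem_map.mpr ⟨c.toNat, List.mem_range.mpr hlt, Char.ofNat_toNat c⟩
  exact List.mem_filter.mpr ⟨hmem, h⟩
theorem alph_split {c : Char} (h : pvDomChar c = true) :
    ∃ s t, alphL = s ++ c :: t ∧ (∀ a ∈ s, a < c) ∧ (∀ b ∈ t, c < b) ∧ s.Nodup := by
  obtain ⟨s, t, hst⟩ := List.append_of_mem (mem_alph h)
  have hp := alph_pairwise
  rw [hst, List.pairwise_append] at hp
  obtain ⟨hps, hpt, hcross⟩ := hp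
  refine ⟨s, t, hst, ?_, ?_, hps.imp ne_of_lt⟩
  · exact fun a ha => hcross a ha c (List.mem_cons_self ..)
  · exact fun b hb => (List.pairwise_cons.mp hpt).1 b hb

theorem numbered_eq (cs : List Char) :
    (PySem.List.pyRange 0 (PySem.List.len cs) 1).foldl
      (fun acc i => acc ++ [(PySem.List.pyGetD cs i ' ', i)]) [] = numberedL cs := by
  rw [PySem.List.foldl_append_singleton_eq_map (f := fun i => (PySem.List.pyGetD cs i ' ', i))]
  rw [PySem.List.pyRange_one, List.map_map]
  simp [numberedL, PySem.List.len_eq]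

theorem idxcnt {α : Type} (d : α) (cs : List α) (p : α → Bool) :
    ∀ j, j ≤ cs.length →
      ((List.range j).filter (fun k => p (cs.getD k d))).length = (cs.take j).countP p := by
  intro j
  induction j with
  | zero => simp
  | succ j ih =>
    intro hj
    have hjl : j < cs.length := by omega
    rw [List.range_succ, List.filter_append, List.length_append, ih (by omega),
      List.take_add_one, List.countP_append]
    have hg : cs[j]? = some cs[j] := List.getElem?_eq_getElem hjl
    simp only [List.getD_eq_getElem?_getD, hg, Option.getD_some, List.filter_singleton]
    by_cases hp : p cs[j] <;> simp [hp]

theorem len_idxsN (cs : List Char) (c : Char) : (idxsN cs c).length = cs.count c := by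
  rw [idxsN, idxcnt ' ' cs (fun x => x == c) cs.length le_rfl, List.take_length,
    List.count_eq_countP]

theorem sum_map_add_nat {α : Type} (S : List α) (u v : α → Nat) :
    (S.map fun a => u a + v a).sum = (S.map u).sum + (S.map v).sum := by
  induction S with
  | nil => simp
  | cons a S ih => simp [ih]; omega

theorem sum_indicator_zero {x : Char} {S : List Char} (h : x ∉ S) :
    (S.map fun a => if (x == a) = true then 1 else 0).sum = 0 := by
  induction S with
  | nil => simp
  | cons a S ih =>
    have hxa : ¬ (x == a) = true := by
      simp only [beq_iff_eq]; exact fun he => h (he ▸ List.mem_cons_self ..)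
    simp only [List.map_cons, List.sum_cons, hxa, ih (fun hm => h (List.mem_cons_of_mem _ hm))]
    simp

theorem sum_indicator (x : Char) (S : List Char) (hnd : S.Nodup) :
    (S.map fun a => if (x == a) = true then 1 else 0).sum = if x ∈ S then 1 else 0 := by
  induction S with
  | nil => simp
  | cons a S ih =>
    rw [List.nodup_cons] at hnd
    by_cases hxa : x = a
    · subst hxa
      have hz := sum_indicator_zero hnd.1
      simp only [beq_iff_eq] at hz ⊢
      simp [hz]
    · simp only [List.map_cons, List.sum_cons, ih hnd.2, List.mem_cons, hxa, false_or]
      simp [hxa]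

theorem sums_counts (c : Char) (S : List Char) (hnd : S.Nodup) (hlt : ∀ a ∈ S, a < c) :
    ∀ cs : List Char, (∀ d ∈ cs, d < c → d ∈ S) →
      (S.map (fun a => cs.count a)).sum = ltcN cs c := by
  intro cs
  induction cs with
  | nil => intro _; simp [ltcN]
  | cons x cs ih =>
    intro hcov
    have hcov' : ∀ d ∈ cs, d < c → d ∈ S := fun d hd => hcov d (List.mem_cons_of_mem _ hd)
    have hcnt : ∀ a : Char, (x :: cs).count a = cs.count a + (if (x == a) = true then 1 else 0) := by
      intro a; rw [List.count_cons]
    simp only [hcnt]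
    rw [sum_map_add_nat, ih hcov', sum_indicator x S hnd]
    simp only [ltcN, List.countP_cons]
    by_cases hxc : x < c
    · simp [hcov x (List.mem_cons_self ..) hxc, hxc]
    · have hxs : x ∉ S := fun hm => hxc (hlt x hm)
      simp [hxs, hxc]

theorem insertBy_cons_eq {α : Type} (before : α → α → Bool) (x y : α) (ys : List α) :
    PySem.List.insertBy before x (y :: ys)
      = if before x y then x :: y :: ys else y :: PySem.List.insertBy before x ys := rfl

theorem insertBy_all_true {α : Type} (before : α → α → Bool) (x : α) (zs : List α)
    (h : ∀ z ∈ zs, before x z = true) : PySem.List.insertBy before x zs = x :: zs := by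
  cases zs with
  | nil => rfl
  | cons z zs => rw [insertBy_cons_eq, if_pos (h z (List.mem_cons_self ..))]

theorem insertBy_append_left {α : Type} (before : α → α → Bool) (x : α) (ys zs : List α)
    (h : ∀ y ∈ ys, before x y = false) :
    PySem.List.insertBy before x (ys ++ zs) = ys ++ PySem.List.insertBy before x zs := by
  induction ys with
  | nil => simp
  | cons y ys ih =>
    rw [List.cons_append, insertBy_cons_eq, if_neg ?_, ih (fun y' hy' => h y' (List.mem_cons_of_mem _ hy')),
      List.cons_append]
    simp [h y (List.mem_cons_self ..)]

theorem insertBy_flatMap (al : List Char) (hp : al.Pairwise (· < ·)) (c : Char) (hc : c ∈ al)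
    (g : Char → List (Char × Int)) (hg : ∀ c' ∈ al, ∀ q ∈ g c', q.1 = c') (i : Int) :
    PySem.List.insertBy (fun a b => decide (a.1 < b.1)) (c, i) (al.flatMap g)
      = al.flatMap (fun c' => if c' = c then g c' ++ [(c, i)] else g c') := by
  induction al with
  | nil => cases hc
  | cons a rest ih =>
    rw [List.pairwise_cons] at hp
    obtain ⟨ha, hrest⟩ := hp
    rw [List.flatMap_cons, List.flatMap_cons]
    by_cases hac : a = c
    · subst hac
      rw [if_pos rfl]
      have hcnotrest : ∀ c' ∈ rest, ¬ (c' = a) := fun c' hc' he => absurd (he ▸ ha c' hc') (lt_irrefl _)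
      have hrw : rest.flatMap (fun c' => if c' = a then g c' ++ [(a, i)] else g c') = rest.flatMap g := by
        apply List.flatMap_congr  -- may not exist; fallback below
        intro c' hc'
        rw [if_neg (hcnotrest c' hc')]
      rw [hrw]
      rw [insertBy_append_left _ _ _ _ ?hleft]
      case hleft =>
        intro y hy
        have := hg a (List.mem_cons_self ..) y hy
        simp [this]
      rw [insertBy_all_true _ _ _ ?htrue]
      case htrue =>
        intro z hz
        obtain ⟨c', hc', hzg⟩ := List.mem_flatMap.mp hz
        have hz1 := hg c' (List.mem_cons_of_mem _ hc') z hzg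
        simp [hz1, ha c' hc']
      simp
    · have hcrest : c ∈ rest := by
        rcases List.mem_cons.mp hc with h | h
        · exact (hac (by simp [h])).elim
        · exact h
      rw [if_neg hac]
      rw [insertBy_append_left _ _ _ _ ?hleft2]
      case hleft2 =>
        intro y hy
        have hy1 := hg a (List.mem_cons_self ..) y hy
        have hlt : a < c := ha c hcrest
        simp [hy1]
        exact le_of_lt hlt
      rw [ih hrest hcrest (fun c' hc' => hg c' (List.mem_cons_of_mem _ hc'))]

theorem numberedL_append (cs : List Char) (c : Char) :
    numberedL (cs ++ [c]) = numberedL cs ++ [(c, (cs.length : Int))] := by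
  unfold numberedL
  rw [List.length_append, List.length_singleton, List.range_succ, List.map_append]
  congr 1
  · apply List.map_congr_left
    intro j hj
    have hjl := List.mem_range.mp hj
    rw [List.getD_append _ _ _ _ hjl]  -- name guess
  · simp [List.getD_eq_getElem?_getD]

theorem idxsN_append (cs : List Char) (c c' : Char) :
    idxsN (cs ++ [c]) c' = idxsN cs c' ++ (if c' = c then [cs.length] else []) := by
  unfold idxsN
  rw [List.length_append, List.length_singleton, List.range_succ, List.filter_append]
  congr 1
  · apply List.filter_congr
    intro j hj
    have hjl := List.mem_range.mp hj
    rw [List.getD_append _ _ _ _ hjl]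
  · have : (cs ++ [c]).getD cs.length ' ' = c := by simp [List.getD_eq_getElem?_getD]
    rw [List.filter_singleton, this]
    by_cases h : c' = c
    · simp [h]
    · have hb : (c == c') = false := beq_eq_false_iff_ne.mpr (fun he => h he.symm)
      simp [h, hb]

theorem canon_eq (cs : List Char) (hdom : ∀ c ∈ cs, pvDomChar c = true) :
    PySem.List.sorted (numberedL cs) (fun x => x.1) false = canon cs := by
  induction cs using List.reverseRecOn with
  | nil =>
    have h1 : numberedL [] = [] := by simp [numberedL]
    have h2 : canon [] = [] := by simp [canon, grp, idxsN]
    rw [h1, h2]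
    rfl
  | append_singleton cs c ih =>
    have hdom' : ∀ c' ∈ cs, pvDomChar c' = true :=
      fun c' hc' => hdom c' (List.mem_append_left _ hc')
    have hdc : pvDomChar c = true := hdom c (List.mem_append_right _ (List.mem_singleton_self _))
    rw [numberedL_append, PySem.List.sorted_eq_foldl_insertBy, List.foldl_append,
      ← PySem.List.sorted_eq_foldl_insertBy, ih hdom']
    rw [List.foldl_cons, List.foldl_nil]
    rw [canon, insertBy_flatMap alphL alph_pairwise c (mem_alph hdc) (grp cs)
      (fun c' _ q hq => by
        obtain ⟨j, _, rfl⟩ := List.mem_map.mp hq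
        rfl) (cs.length : Int)]
    unfold canon
    apply List.flatMap_congr
    intro c' _
    have hrhs : grp (cs ++ [c]) c' = grp cs c' ++ (if c' = c then [(c', (cs.length : Int))] else []) := by
      rw [grp, grp, idxsN_append, List.map_append]
      congr 1
      by_cases h : c' = c
      · simp [h]
      · simp [h]
    rw [hrhs]
    by_cases h : c' = c
    · subst h; simp
    · simp [h]

theorem map_fst_numbered (cs : List Char) : (numberedL cs).map Prod.fst = cs := by
  unfold numberedL
  rw [List.map_map]
  apply List.ext_getElem
  · simp
  · intro i h1 h2
    simp only [List.getElem_map, List.getElem_range, Function.comp]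
    rw [List.getD_eq_getElem _ _ (by simpa using h1)]

theorem map_fst_canon (cs : List Char) :
    (canon cs).map Prod.fst = schrL cs := by
  unfold canon schrL
  rw [List.map_flatMap]
  apply List.flatMap_congr
  intro c _
  rw [grp, List.map_map]
  show (idxsN cs c).map (fun _ => c) = _
  rw [List.map_const', len_idxsN]

theorem schars_eq (cs : List Char) (hdom : ∀ c ∈ cs, pvDomChar c = true) :
    PySem.List.sorted cs (fun c => c) false = schrL cs := by
  refine PySem.List.sorted_id_eq_of_perm_of_pairwise cs (schrL cs) ?_ ?_
  · have h1 : (canon cs).Perm (numberedL cs) := by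
      rw [← canon_eq cs hdom]; exact PySem.List.sorted_perm _ _ _
    have h2 := h1.map Prod.fst
    rw [map_fst_canon, map_fst_numbered] at h2
    exact h2
  · have h3 := PySem.List.sorted_map_key_pairwise (numberedL cs) (fun x => x.1)
    rw [canon_eq cs hdom] at h3
    have : (canon cs).map (fun x => x.1) = schrL cs := map_fst_canon cs
    rwa [this] at h3

theorem flatMap_len_ltc (cs : List Char) (hdom : ∀ c ∈ cs, pvDomChar c = true)
    {c : Char} (s t : List Char) (hst : alphL = s ++ c :: t) (hlt : ∀ a ∈ s, a < c)
    (hgt : ∀ b ∈ t, c < b) (hnd : s.Nodup)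
    (g : Char → List (Char × Int)) (hlen : ∀ a, (g a).length = cs.count a) :
    (s.flatMap g).length = ltcN cs c := by
  rw [List.length_flatMap]
  have : s.map (fun a => (g a).length) = s.map (fun a => cs.count a) :=
    List.map_congr_left (fun a _ => hlen a)
  rw [this]
  refine sums_counts c s hnd hlt cs ?_
  intro d hd hdc
  have hda : d ∈ alphL := mem_alph (hdom d hd)
  rw [hst] at hda
  rcases List.mem_append.mp hda with h | h
  · exact h
  · rcases List.mem_cons.mp h with h' | h'
    · exact absurd (h' ▸ hdc) (lt_irrefl _)
    · exact absurd (hgt d h') (lt_asymm hdc)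

theorem schr_getD (cs : List Char) (hdom : ∀ c ∈ cs, pvDomChar c = true) {c : Char}
    (h : pvDomChar c = true) {k : Nat}
    (hk : k < cs.count c) : (schrL cs).getD (ltcN cs c + k) ' ' = c := by
  obtain ⟨s, t, hst, hlt, hgt, hnd⟩ := alph_split h
  have hflen : ((s.flatMap (fun c => (List.replicate (cs.count c) c).map
      (fun ch => (ch, (0:Int))))).length) = ltcN cs c := by
    refine flatMap_len_ltc cs hdom s t hst hlt hgt hnd _ ?_
    intro a; simp
  -- direct: length of char-level flatMap
  have hflen' : (s.flatMap (fun c => List.replicate (cs.count c) c)).length = ltcN cs c := by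
    rw [List.length_flatMap] at hflen ⊢
    simpa using hflen
  rw [schrL, hst, List.flatMap_append, List.flatMap_cons]
  rw [List.getD_append_right _ _ _ _ (by omega)]
  rw [hflen']
  have : ltcN cs c + k - ltcN cs c = k := by omega
  rw [this, List.getD_append _ _ _ _ (by simpa using hk)]
  simp [List.getD_eq_getElem?_getD, hk]

theorem idxOf_map_natCast (j : Nat) (l : List Nat) :
    ((l.map (fun (k : Nat) => (k : Int))).idxOf ((j : Nat) : Int)) = l.idxOf j := by
  induction l with
  | nil => simp
  | cons a l ih =>
    rw [List.map_cons, List.idxOf_cons, List.idxOf_cons, ih]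
    by_cases h : a = j
    · simp [h]
    · have h1 : ((a : Int) == (j : Int)) = false := by simpa using h
      have h2 : (a == j) = false := by simpa using h
      rw [h1, h2]

theorem idxOf_idxsN (cs : List Char) (c : Char) (j : Nat) (hj : j < cs.length)
    (hc : cs.getD j ' ' = c) : (idxsN cs c).idxOf j = cntTake cs c j := by
  unfold idxsN
  rw [show cs.length = j + (cs.length - j) by omega, List.range_add, List.filter_append,
    List.idxOf_append]
  rw [if_neg (by
    intro hmem
    have := List.mem_range.mp (List.mem_of_mem_filter hmem)
    omega)]
  have hrest : ((List.range (cs.length - j)).map (fun y => j + y)).filter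
      (fun k => cs.getD k ' ' == c) = j :: (((List.range (cs.length - j - 1)).map
        (fun y => j + (y + 1))).filter (fun k => cs.getD k ' ' == c)) := by
    rw [show cs.length - j = (cs.length - j - 1) + 1 by omega, List.range_succ_eq_map,
      List.map_cons, List.filter_cons]
    simp only [Nat.add_zero, hc, beq_self_eq_true, if_pos, List.map_map]
    rfl
  rw [hrest, List.idxOf_cons, beq_self_eq_true]
  show 0 + ((List.range j).filter (fun k => cs.getD k ' ' == c)).length = cntTake cs c j
  rw [Nat.zero_add, idxcnt ' ' cs (fun x => x == c) j (by omega), cntTake, List.count_eq_countP]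

theorem perm_eq (cs : List Char) (hdom : ∀ c ∈ cs, pvDomChar c = true) :
    pyLastToFirst cs = alphL.flatMap (fun c => (idxsN cs c).map (fun (j : Nat) => (j : Int))) := by
  show (PySem.List.sorted ((PySem.List.pyRange 0 (PySem.List.len cs) 1).foldl
      (fun acc i => acc ++ [(PySem.List.pyGetD cs i ' ', i)]) []) (fun x => x.1) false).map
      (fun x => x.2) = _
  rw [numbered_eq, canon_eq cs hdom, canon, List.map_flatMap]
  apply List.flatMap_congr
  intro c _
  rw [grp, List.map_map]
  rfl

theorem perm_perm (cs : List Char) :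
    (pyLastToFirst cs).Perm ((List.range cs.length).map (fun (j : Nat) => (j : Int))) := by
  show ((PySem.List.sorted ((PySem.List.pyRange 0 (PySem.List.len cs) 1).foldl
      (fun acc i => acc ++ [(PySem.List.pyGetD cs i ' ', i)]) []) (fun x => x.1) false).map
      (fun x => x.2)).Perm _
  rw [numbered_eq]
  have h1 := (PySem.List.sorted_perm (numberedL cs) (fun x => x.1) false).map (fun x => x.2)
  have h2 : (numberedL cs).map (fun x => x.2) = (List.range cs.length).map (fun (j : Nat) => (j : Int)) := by
    unfold numberedL; rw [List.map_map]; rfl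
  rwa [h2] at h1

theorem inv_loop_len (n : Nat) (f : List Int → Nat → List Int)
    (hf : ∀ inv j, (f inv j).length = inv.length) :
    ∀ m, ((List.range m).foldl f (List.replicate n (0 : Int))).length = n := by
  intro m
  induction m with
  | zero => simp
  | succ m ih => rw [List.range_succ, List.foldl_append, List.foldl_cons, List.foldl_nil, hf, ih]

theorem idxOf_perm (cs : List Char) (hdom : ∀ c ∈ cs, pvDomChar c = true) (j : Nat)
    (hj : j < cs.length) : (pyLastToFirst cs).idxOf ((j : Nat) : Int) = rkN cs j := by
  rw [perm_eq cs hdom]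
  have hcjmem : cs.getD j ' ' ∈ cs := by
    rw [List.getD_eq_getElem _ _ hj]; exact List.getElem_mem hj
  obtain ⟨s, t, hst, hlt, hgt, hnd⟩ := alph_split (hdom _ hcjmem)
  rw [hst, List.flatMap_append, List.flatMap_cons, List.idxOf_append]
  rw [if_neg (by
    intro hmem
    obtain ⟨a, ha, hja⟩ := List.mem_flatMap.mp hmem
    obtain ⟨j', hj', hjj'⟩ := List.mem_map.mp hja
    have hjeq : j' = j := by exact_mod_cast hjj'
    subst hjeq
    have := List.of_mem_filter hj'
    have hga : cs.getD j' ' ' = a := by simpa using this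
    exact absurd (hga ▸ hlt a ha) (lt_irrefl _))]
  rw [List.idxOf_append, if_pos (by
    refine List.mem_map.mpr ⟨j, ?_, rfl⟩
    refine List.mem_filter.mpr ⟨List.mem_range.mpr hj, by simp⟩)]
  rw [idxOf_map_natCast, idxOf_idxsN cs _ j hj rfl]
  have hlts : (s.flatMap (fun c => (idxsN cs c).map (fun (k : Nat) => (k : Int)))).length
      = ltcN cs (cs.getD j ' ') := by
    rw [List.length_flatMap]
    have h1 : s.map (fun a => ((idxsN cs a).map (fun (k : Nat) => (k : Int))).length)
        = s.map (fun a => cs.count a) := by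
      apply List.map_congr_left
      intro a _
      rw [List.length_map, len_idxsN]
    rw [h1]
    refine sums_counts _ s hnd hlt cs ?_
    intro d hd hdc
    have hda : d ∈ alphL := mem_alph (hdom d hd)
    rw [hst] at hda
    rcases List.mem_append.mp hda with h | h
    · exact h
    · rcases List.mem_cons.mp h with h' | h'
      · exact absurd (h' ▸ hdc) (lt_irrefl _)
      · exact absurd (hgt d h') (lt_asymm hdc)
  rw [hlts, rkN]
  omega

theorem inv_loop (perm : List Int) (n : Nat) (hlen : perm.length = n)
    (hmem : ∀ v ∈ perm, ∃ k : Nat, k < n ∧ v = (k : Int)) (hnd : perm.Nodup) :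
    ∀ m, m ≤ n → ∀ j, j < n →
      ((List.range m).foldl (fun inv (i : Nat) =>
          PySem.List.pySetD inv (perm.getD i 0) ((i : Nat) : Int)) (List.replicate n (0 : Int))).getD j 0
        = if ((j : Nat) : Int) ∈ perm.take m then (perm.idxOf ((j : Nat) : Int) : Int) else 0 := by
  intro m
  induction m with
  | zero =>
    intro _ j hjn
    simp
  | succ m ih =>
    intro hm j hjn
    rw [List.range_succ, List.foldl_append, List.foldl_cons, List.foldl_nil]
    have hmn : m < perm.length := by omega
    have hpm : perm.getD m 0 = perm[m] := List.getD_eq_getElem _ _ hmn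
    obtain ⟨k, hkn, hkv⟩ := hmem perm[m] (List.getElem_mem hmn)
    have hsetd : PySem.List.pySetD ((List.range m).foldl (fun inv (i : Nat) =>
        PySem.List.pySetD inv (perm.getD i 0) ((i : Nat) : Int)) (List.replicate n (0 : Int)))
        (perm.getD m 0) ((m : Nat) : Int)
        = ((List.range m).foldl (fun inv (i : Nat) =>
        PySem.List.pySetD inv (perm.getD i 0) ((i : Nat) : Int)) (List.replicate n (0 : Int))).set k ((m : Nat) : Int) := by
      rw [hpm, hkv]
      exact PySem.List.pySetD_natCast _ _ _
    rw [hsetd]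
    have hprevlen : ((List.range m).foldl (fun inv (i : Nat) =>
        PySem.List.pySetD inv (perm.getD i 0) ((i : Nat) : Int)) (List.replicate n (0 : Int))).length = n := by
      refine inv_loop_len n _ ?_ m
      intro inv i
      exact PySem.List.length_pySetD _ _ _
    have htake : perm.take (m + 1) = perm.take m ++ [perm[m]] := by
      rw [List.take_add_one, List.getElem?_eq_getElem hmn]
      rfl
    by_cases hjk : k = j
    · subst hjk
      rw [List.getD_eq_getElem _ _ (by rw [List.length_set, hprevlen]; omega),
        List.getElem_set, if_pos rfl]
      have hidx : perm.idxOf ((k : Nat) : Int) = m := by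
        rw [← hkv]
        exact List.Nodup.idxOf_getElem hnd m hmn
      rw [hidx, htake, if_pos (by
        refine List.mem_append.mpr (Or.inr ?_)
        rw [hkv]
        exact List.mem_singleton_self _)]
    · rw [List.getD_eq_getElem _ _ (by rw [List.length_set, hprevlen]; omega),
        List.getElem_set, if_neg hjk, htake]
      have hmem' : (((j : Nat) : Int) ∈ perm.take m ++ [perm[m]]) ↔ (((j : Nat) : Int) ∈ perm.take m) := by
        rw [List.mem_append, List.mem_singleton]
        constructor
        · rintro (h | h)
          · exact h
          · exfalso
            rw [hkv] at h
            exact hjk (by exact_mod_cast h.symm)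
        · exact Or.inl
      rw [← List.getD_eq_getElem _ _ (by rw [hprevlen]; omega)]
      rw [ih (by omega) j hjn]
      by_cases hmem2 : ((j : Nat) : Int) ∈ perm.take m
      · rw [if_pos hmem2, if_pos (hmem'.mpr hmem2)]
      · rw [if_neg hmem2, if_neg (fun hc => hmem2 (hmem'.mp hc))]

theorem fperm_eq (cs : List Char) (hdom : ∀ c ∈ cs, pvDomChar c = true) :
    pyInverse (pyLastToFirst cs) = (List.range cs.length).map (fun j => (rkN cs j : Int)) := by
  set perm := pyLastToFirst cs with hperm
  have hpp := perm_perm cs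
  have hlen : perm.length = cs.length := by
    have := hpp.length_eq
    simpa using this
  have hmem : ∀ v ∈ perm, ∃ k : Nat, k < cs.length ∧ v = (k : Int) := by
    intro v hv
    have : v ∈ (List.range cs.length).map (fun (j : Nat) => (j : Int)) := hpp.mem_iff.mp hv
    obtain ⟨k, hk, rfl⟩ := List.mem_map.mp this
    exact ⟨k, List.mem_range.mp hk, rfl⟩
  have hnd : perm.Nodup := by
    refine hpp.nodup_iff.mpr ?_
    refine List.Nodup.map (fun a b hab => by exact_mod_cast hab) (List.nodup_range)
  have hbody : pyInverse perm = (List.range cs.length).foldl (fun inv (i : Nat) =>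
      PySem.List.pySetD inv (perm.getD i 0) ((i : Nat) : Int)) (List.replicate cs.length (0 : Int)) := by
    rw [pyInverse, PySem.List.pyRange_one, PySem.List.len_eq, hlen]
    rw [show ((cs.length : Int) - 0).toNat = cs.length by omega]
    rw [List.foldl_map]
    congr 1
    funext inv k
    rw [show (0 : Int) + (k : Int) = ((k : Nat) : Int) by omega, PySem.List.pyGetD_natCast]
  rw [hbody]
  apply List.ext_getElem
  · rw [inv_loop_len cs.length _ (fun inv i => PySem.List.length_pySetD _ _ _) cs.length]
    simp
  · intro i h1 h2
    have hilen : i < cs.length := by simpa using h2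
    rw [← List.getD_eq_getElem _ 0 h1]
    rw [inv_loop perm cs.length hlen hmem hnd cs.length le_rfl i hilen]
    rw [show List.take cs.length perm = perm by rw [← hlen, List.take_length]]
    rw [if_pos (hpp.mem_iff.mpr (List.mem_map.mpr ⟨i, List.mem_range.mpr hilen, rfl⟩))]
    rw [idxOf_perm cs hdom i hilen]
    simp

theorem cnt_take_succ (cs : List Char) (c : Char) (j : Nat) (hj : j < cs.length) :
    cntTake cs c (j + 1) = cntTake cs c j + (if cs.getD j ' ' == c then 1 else 0) := by
  unfold cntTake
  rw [List.take_add_one, List.count_append, List.getElem?_eq_getElem hj]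
  rw [List.getD_eq_getElem _ _ hj]
  by_cases h : cs[j] == c
  · simp [h, List.count_singleton]
  · simp at h
    simp [h]

theorem cnt_take_mono (cs : List Char) (c : Char) {a b : Nat} (hab : a ≤ b) :
    cntTake cs c a ≤ cntTake cs c b := by
  unfold cntTake
  have : cs.take a = (cs.take b).take a := by rw [List.take_take, min_eq_left hab]
  rw [this]
  exact (List.take_sublist _ _).count_le c

theorem cnt_take_le_count (cs : List Char) (c : Char) (j : Nat) :
    cntTake cs c j ≤ cs.count c := (List.take_sublist _ _).count_le c

theorem cnt_take_lt_count (cs : List Char) {c : Char} {j : Nat} (hj : j < cs.length)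
    (hc : cs.getD j ' ' = c) : cntTake cs c j < cs.count c := by
  have h1 := cnt_take_succ cs c j hj
  rw [hc] at h1
  simp only [beq_self_eq_true, if_pos] at h1
  have h2 := cnt_take_le_count cs c (j + 1)
  omega

theorem ltc_add_count_le (cs : List Char) (c : Char) : ltcN cs c + cs.count c ≤ cs.length := by
  have h1 := List.length_eq_countP_add_countP (fun d => decide (d < c)) (l := cs)
  have h2 : cs.count c ≤ cs.countP (fun a => decide (¬ (decide (a < c)) = true)) := by
    rw [List.count_eq_countP]
    refine List.countP_mono_left ?_
    intro x _ hx
    have : x = c := by simpa using hx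
    subst this
    simp
  unfold ltcN
  omega

theorem cand_range (cs : List Char) (c : Char) :
    ∀ d a, a + d ≤ cs.length →
      ((List.range' a d).filter (fun j => cs.getD j ' ' == c)).map
          (fun j => ltcN cs c + cntTake cs c j)
        = List.range' (ltcN cs c + cntTake cs c a) (cntTake cs c (a + d) - cntTake cs c a) := by
  intro d
  induction d with
  | zero =>
    intro a _
    simp
  | succ d ih =>
    intro a ha
    have hlast : a + d < cs.length := by omega
    rw [List.range'_concat, List.filter_append, List.map_append, ih a (by omega)]
    have hsucc := cnt_take_succ cs c (a + d) hlast
    have hmono : cntTake cs c a ≤ cntTake cs c (a + d) := cnt_take_mono cs c (by omega)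
    show _ ++ (List.filter _ [a + 1 * d]).map _ = _
    rw [List.filter_singleton]
    by_cases h : cs.getD (a + 1 * d) ' ' == c
    · rw [h, cond_true]
      have hs' : cntTake cs c (a + (d+1)) = cntTake cs c (a + d) + 1 := by
        rw [show a + (d + 1) = (a + d) + 1 by omega, hsucc]
        simp only [Nat.one_mul] at h
        rw [if_pos h]
      rw [hs', show cntTake cs c (a+d) + 1 - cntTake cs c a = (cntTake cs c (a+d) - cntTake cs c a) + 1 by omega,
        List.range'_concat]
      simp only [List.map_cons, List.map_nil, Nat.one_mul]
      congr 2
      omega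
    · rw [Bool.not_eq_true] at h
      rw [h, cond_false]
      have hs' : cntTake cs c (a + (d+1)) = cntTake cs c (a + d) := by
        rw [show a + (d + 1) = (a + d) + 1 by omega, hsucc]
        simp only [Nat.one_mul] at h
        rw [h]
        simp
      rw [hs']
      simp

theorem drop_take_range (n a k : Nat) (h : a + k ≤ n) :
    ((List.range n).drop a).take k = List.range' a k := by
  apply List.ext_getElem
  · simp; omega
  · intro i h1 h2
    simp only [List.getElem_take, List.getElem_drop, List.getElem_range, List.getElem_range']
    omega

theorem min_range'_cast (s k : Nat) (hk : 0 < k) :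
    PySem.List.min? ((List.range' s k).map (fun (j : Nat) => (j : Int))) (fun x => x)
      = some ((s : Nat) : Int) := by
  have hne : (List.range' s k).map (fun (j : Nat) => (j : Int)) ≠ [] := by
    simp
    omega
  obtain ⟨m, hm⟩ : ∃ m, PySem.List.min? ((List.range' s k).map (fun (j : Nat) => (j : Int))) (fun x => x) = some m := by
    cases hmin : PySem.List.min? ((List.range' s k).map (fun (j : Nat) => (j : Int))) (fun x => x) with
    | none => exact absurd ((PySem.List.min?_eq_none_iff _ _).mp hmin) hne
    | some m => exact ⟨m, rfl⟩
  have hmem := PySem.List.min?_mem hm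
  obtain ⟨j, hj, rfl⟩ := List.mem_map.mp hmem
  have hjs : s ≤ j := by
    obtain ⟨i, _, rfl⟩ := List.mem_range'.mp hj
    omega
  have hsmem : ((s : Nat) : Int) ∈ (List.range' s k).map (fun (j : Nat) => (j : Int)) :=
    List.mem_map.mpr ⟨s, List.mem_range'.mpr ⟨0, by omega⟩, rfl⟩
  have hle := PySem.List.min?_isMin hm _ hsmem
  rw [hm]
  congr 1
  simp only at hle
  exact_mod_cast le_antisymm hle (by exact_mod_cast hjs)

theorem max_range'_cast (s k : Nat) (hk : 0 < k) :
    PySem.List.max? ((List.range' s k).map (fun (j : Nat) => (j : Int))) (fun x => x)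
      = some (((s + k - 1 : Nat)) : Int) := by
  have hne : (List.range' s k).map (fun (j : Nat) => (j : Int)) ≠ [] := by
    simp
    omega
  obtain ⟨m, hm⟩ : ∃ m, PySem.List.max? ((List.range' s k).map (fun (j : Nat) => (j : Int))) (fun x => x) = some m := by
    cases hmax : PySem.List.max? ((List.range' s k).map (fun (j : Nat) => (j : Int))) (fun x => x) with
    | none => exact absurd ((PySem.List.max?_eq_none_iff _ _).mp hmax) hne
    | some m => exact ⟨m, rfl⟩
  have hmem := PySem.List.max?_mem hm
  obtain ⟨j, hj, rfl⟩ := List.mem_map.mp hmem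
  have hjs : j ≤ s + k - 1 := by
    obtain ⟨i, hi, rfl⟩ := List.mem_range'.mp hj
    omega
  have hsmem : (((s + k - 1 : Nat)) : Int) ∈ (List.range' s k).map (fun (j : Nat) => (j : Int)) :=
    List.mem_map.mpr ⟨s + k - 1, List.mem_range'.mpr ⟨k - 1, by omega⟩, rfl⟩
  have hle := PySem.List.max?_isMax hm _ hsmem
  rw [hm]
  congr 1
  simp only at hle
  exact_mod_cast le_antisymm (by exact_mod_cast hjs) hle

theorem getD_mono (a : List Int) (hs : a.Pairwise (· ≤ ·)) {i j : Nat} (hij : i ≤ j)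
    (hj : j < a.length) : a.getD i 0 ≤ a.getD j 0 := by
  rcases Nat.eq_or_lt_of_le hij with he | hl
  · subst he; exact le_rfl
  · have hij' := List.pairwise_iff_getElem.mp hs i j (by omega) hj hl
    rwa [List.getD_eq_getElem _ _ (by omega), List.getD_eq_getElem _ _ hj]

theorem countP_boundary (a : List Int) (p : Int → Bool) (m : Nat) (hm : m ≤ a.length)
    (h1 : ∀ i, i < m → p (a.getD i 0) = true)
    (h2 : ∀ i, m ≤ i → i < a.length → p (a.getD i 0) = false) :
    a.countP p = m := by
  have hx := idxcnt (0:Int) a p a.length le_rfl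
  rw [List.take_length] at hx
  rw [← hx, show a.length = m + (a.length - m) by omega, List.range_add, List.filter_append]
  have e1 : (List.range m).filter (fun k => p (a.getD k 0)) = List.range m :=
    List.filter_eq_self.mpr (fun k hk => h1 k (List.mem_range.mp hk))
  have e2 : ((List.range (a.length - m)).map (fun y => m + y)).filter
      (fun k => p (a.getD k 0)) = [] := by
    refine List.filter_eq_nil_iff.mpr ?_
    intro k hk
    obtain ⟨y, hy, rfl⟩ := List.mem_map.mp hk
    have hy' := List.mem_range.mp hy
    simpa using h2 (m + y) (by omega) (by omega)
  rw [List.length_append, e1, e2]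
  simp

theorem bisect_loop (a : List Int) (x : Int) (hs : a.Pairwise (· ≤ ·)) :
    ∀ (k : Nat) (lo hi : Int), (hi - lo).toNat ≤ k → 0 ≤ lo → lo ≤ hi → hi ≤ (a.length : Int) →
      (∀ i : Nat, i < lo.toNat → a.getD i 0 < x) →
      (∀ i : Nat, hi.toNat ≤ i → i < a.length → ¬ a.getD i 0 < x) →
      altBisectLoop a x lo hi = (a.countP (fun v => decide (v < x)) : Int) := by
  intro k
  induction k with
  | zero =>
    intro lo hi hk h0 hlh hhl h1 h2
    have hlo : lo = hi := by omega
    rw [altBisectLoop, dif_neg (by omega : ¬ lo < hi)]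
    have : a.countP (fun v => decide (v < x)) = lo.toNat := by
      refine countP_boundary a _ lo.toNat (by omega) ?_ ?_
      · intro i hi'; simpa using h1 i hi'
      · intro i hi1 hi2
        have := h2 i (by omega) hi2
        simpa using this
    rw [this]; omega
  | succ k ih =>
    intro lo hi hk h0 hlh hhl h1 h2
    by_cases hlt : lo < hi
    · rw [altBisectLoop, dif_pos hlt]
      show (if PySem.List.pyGetD a (PySem.Int.floordiv (lo + hi) 2) 0 < x then
          altBisectLoop a x (PySem.Int.floordiv (lo + hi) 2 + 1) hi
        else altBisectLoop a x lo (PySem.Int.floordiv (lo + hi) 2)) = _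
      have hmid := PySem.Int.floordiv_two_mid_bounds (lo := lo) (hi := hi) (by omega)
      have hmidlt : PySem.Int.floordiv (lo + hi) 2 < hi := by
        rw [PySem.Int.floordiv_lt_iff_lt_mul (by omega)]; omega
      set mid := PySem.Int.floordiv (lo + hi) 2 with hmiddef
      have hmlen : mid < (a.length : Int) := by omega
      have hgetD : PySem.List.pyGetD a mid 0 = a.getD mid.toNat 0 := by
        rw [PySem.List.pyGetD_eq_getElem a (i := mid) 0 (by omega) (by exact_mod_cast hmlen),
          List.getD_eq_getElem _ _ (by omega)]
      by_cases hcmp : PySem.List.pyGetD a mid 0 < x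
      · have hcmp' : a.getD mid.toNat 0 < x := by rw [← hgetD]; exact hcmp
        rw [if_pos hcmp]
        refine ih (mid + 1) hi (by omega) (by omega) (by omega) hhl ?_ h2
        intro i hi'
        have hilen : i < a.length := by omega
        have hle : a.getD i 0 ≤ a.getD mid.toNat 0 := getD_mono a hs (by omega) (by omega)
        omega
      · have hcmp' : ¬ a.getD mid.toNat 0 < x := by rw [← hgetD]; exact hcmp
        rw [if_neg hcmp]
        refine ih lo mid (by omega) h0 (by omega) (by omega) h1 ?_
        intro i hi1 hi2
        have hle : a.getD mid.toNat 0 ≤ a.getD i 0 := getD_mono a hs (by omega) hi2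
        omega
    · exact ih lo hi (by omega) h0 hlh hhl h1 h2

theorem bisect_count (a : List Int) (x : Int) (hs : a.Pairwise (· ≤ ·)) :
    altBisect a x = (a.countP (fun v => decide (v < x)) : Int) := by
  rw [altBisect, PySem.List.len_eq]
  refine bisect_loop a x hs a.length 0 a.length (by omega) (by omega) (by omega) le_rfl ?_ ?_
  · intro i hi; omega
  · intro i hi1 hi2; omega

def occB (cs : List Char) : PySem.Dict Char (List Int) :=
  (PySem.List.pyRange 0 (PySem.List.len cs) 1).foldl
    (fun d i => d.modify (PySem.List.pyGetD cs i ' ') [] (fun l => l ++ [i])) PySem.Dict.empty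

def firstB (cs : List Char) : PySem.Dict Char Int :=
  ((PySem.List.sorted (occB cs).keys (fun c => c) false).foldl
      (fun (p : PySem.Dict Char Int × Int) ch =>
        (p.1.insert ch p.2, p.2 + PySem.List.len ((occB cs).getD ch [])))
      (PySem.Dict.empty, 0)).1

theorem occB_eq_foldl (cs : List Char) :
    occB cs = (numberedL cs).foldl
      (fun d p => d.modify p.1 [] (fun l => l ++ [p.2])) PySem.Dict.empty := by
  unfold occB numberedL
  rw [PySem.List.pyRange_one, PySem.List.len_eq,
    show ((cs.length : Int) - 0).toNat = cs.length by omega, List.foldl_map, List.foldl_map]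
  congr 1
  funext d j
  rw [show (0 : Int) + (j : Int) = ((j : Nat) : Int) by omega, PySem.List.pyGetD_natCast]

theorem occB_getD (cs : List Char) (c : Char) :
    (occB cs).getD c [] = (idxsN cs c).map (fun (j : Nat) => (j : Int)) := by
  rw [occB_eq_foldl, PySem.Dict.getD_foldl_modify_append]
  have hf : (numberedL cs).filter (fun p => p.1 == c)
      = (idxsN cs c).map (fun j => (cs.getD j ' ', (j : Int))) := by
    unfold numberedL idxsN
    rw [List.filter_map]
    rfl
  rw [hf, List.map_map]
  simp

theorem occB_keys (cs : List Char) : (occB cs).keys = PySem.Set.ofList cs := by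
  rw [occB_eq_foldl]
  rw [PySem.Dict.keys_foldl_modify_key (numberedL cs) (fun p => p.1) []
    (fun d p => (fun l => l ++ [p.2])) PySem.Dict.empty]
  rw [map_fst_numbered]
  have hk : (PySem.Dict.empty : PySem.Dict Char (List Int)).keys = [] := rfl
  rw [hk, PySem.Set.update_eq_append_filter]
  rw [List.nil_append]
  apply List.filter_eq_self.mpr
  intro a _
  rfl

theorem occB_contains (cs : List Char) (c : Char) :
    (occB cs).contains c = true ↔ c ∈ cs := by
  rw [PySem.Dict.contains_iff_mem_keys, occB_keys, PySem.Set.mem_ofList]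

theorem sum_map_cast (u : List Char) (f : Char → Nat) :
    (u.map (fun a => ((f a : Nat) : Int))).sum = (((u.map f).sum : Nat) : Int) := by
  induction u with
  | nil => simp
  | cons a u ih => simp [ih]

theorem ft_snd (cs : List Char) :
    ∀ (u : List Char) (d : PySem.Dict Char Int) (t : Int),
      ((u.foldl (fun (p : PySem.Dict Char Int × Int) ch =>
          (p.1.insert ch p.2, p.2 + PySem.List.len ((occB cs).getD ch []))) (d, t)).2)
        = t + (u.map (fun ch => PySem.List.len ((occB cs).getD ch []))).sum := by
  intro u
  induction u with
  | nil => intro d t; simp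
  | cons a u ih =>
    intro d t
    rw [List.foldl_cons, ih, List.map_cons, List.sum_cons]
    omega

theorem ft_fst_not_mem (cs : List Char) (c : Char) :
    ∀ (u : List Char), c ∉ u → ∀ (d : PySem.Dict Char Int) (t : Int),
      (((u.foldl (fun (p : PySem.Dict Char Int × Int) ch =>
          (p.1.insert ch p.2, p.2 + PySem.List.len ((occB cs).getD ch []))) (d, t)).1)).getD c 0
        = d.getD c 0 := by
  intro u
  induction u with
  | nil => intro _ d t; rfl
  | cons a u ih =>
    intro hc d t
    rw [List.foldl_cons, ih (fun h => hc (List.mem_cons_of_mem _ h))]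
    exact PySem.Dict.getD_insert_of_ne d _ _ (fun he => hc (List.mem_cons.mpr (Or.inl he)))

theorem firstB_getD (cs : List Char) (c : Char)
    (hc : c ∈ cs) : (firstB cs).getD c 0 = (ltcN cs c : Int) := by
  unfold firstB
  rw [occB_keys]
  have hpw := PySem.List.sorted_ofList_pairwise_lt (xs := cs)
  have hmemsc : c ∈ PySem.List.sorted (PySem.Set.ofList cs) (fun x => x) false := by
    rw [PySem.List.mem_sorted, PySem.Set.mem_ofList]
    exact hc
  obtain ⟨u, v, huv⟩ := List.append_of_mem hmemsc
  rw [huv] at hpw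
  rw [List.pairwise_append] at hpw
  obtain ⟨hpu, hpv, hcross⟩ := hpw
  have hult : ∀ a ∈ u, a < c := fun a ha => hcross a ha c (List.mem_cons_self ..)
  have hcv : c ∉ v := fun hm => absurd ((List.pairwise_cons.mp hpv).1 c hm) (lt_irrefl _)
  rw [huv, List.foldl_append, List.foldl_cons]
  rw [ft_fst_not_mem cs c v hcv]
  show (PySem.Dict.insert _ c _).getD c 0 = _
  rw [PySem.Dict.getD_insert_self]
  rw [ft_snd]
  have hw : u.map (fun ch => PySem.List.len ((occB cs).getD ch []))
      = u.map (fun ch => ((cs.count ch : Nat) : Int)) := by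
    apply List.map_congr_left
    intro a _
    rw [occB_getD, PySem.List.len_eq, List.length_map, len_idxsN]
  rw [hw, sum_map_cast]
  have hsum : (u.map (fun a => cs.count a)).sum = ltcN cs c := by
    refine sums_counts c u (hpu.imp ne_of_lt) hult cs ?_
    intro d hd hdc
    have hdsc : d ∈ PySem.List.sorted (PySem.Set.ofList cs) (fun x => x) false := by
      rw [PySem.List.mem_sorted, PySem.Set.mem_ofList]
      exact hd
    rw [huv] at hdsc
    rcases List.mem_append.mp hdsc with h | h
    · exact h
    · rcases List.mem_cons.mp h with h' | h'
      · exact absurd (h' ▸ hdc) (lt_irrefl _)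
      · exact absurd ((List.pairwise_cons.mp hpv).1 d h') (lt_asymm hdc)
  rw [hsum]
  omega

theorem bisect_idxs (cs : List Char) (c : Char) (x : Int) (hx0 : 0 ≤ x)
    (hxn : x ≤ (cs.length : Int)) :
    altBisect ((idxsN cs c).map (fun (j : Nat) => (j : Int))) x
      = (cntTake cs c x.toNat : Int) := by
  have hpw : ((idxsN cs c).map (fun (j : Nat) => (j : Int))).Pairwise (· ≤ ·) := by
    refine List.Pairwise.map _ ?_ ((List.pairwise_lt_range (n := cs.length)).filter _)
    intro a b hab
    exact_mod_cast le_of_lt hab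
  rw [bisect_count _ _ hpw, List.countP_map]
  congr 1
  set a := x.toNat with ha
  have hxa : x = (a : Int) := by omega
  have hfun : ((fun v => decide (v < x)) ∘ (fun (j : Nat) => (j : Int)))
      = fun (j : Nat) => decide (j < a) := by
    funext j
    simp only [Function.comp, hxa]
    simp
  rw [hfun]
  unfold idxsN
  rw [List.countP_filter]
  have han : a ≤ cs.length := by omega
  have hflt : (List.range cs.length).countP (fun j => decide (j < a) && (cs.getD j ' ' == c))
      = ((List.range a).filter (fun j => cs.getD j ' ' == c)).length := by
    rw [List.countP_eq_length_filter]
    congr 1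
    rw [show cs.length = a + (cs.length - a) by omega, List.range_add, List.filter_append]
    have h1 : (List.range a).filter (fun j => decide (j < a) && (cs.getD j ' ' == c))
        = (List.range a).filter (fun j => cs.getD j ' ' == c) := by
      apply List.filter_congr
      intro j hj
      have := List.mem_range.mp hj
      simp [this]
    have h2 : ((List.range (cs.length - a)).map (fun y => a + y)).filter
        (fun j => decide (j < a) && (cs.getD j ' ' == c)) = [] := by
      apply List.filter_eq_nil_iff.mpr
      intro k hk
      obtain ⟨y, _, rfl⟩ := List.mem_map.mp hk
      simp
    rw [h1, h2, List.append_nil]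
  rw [hflt, idxcnt ' ' cs (fun ch => ch == c) a han, cntTake, List.count_eq_countP]

theorem loop_eq (cs : List Char) (hdom : ∀ c ∈ cs, pvDomChar c = true) (pat : List Char) :
    ∀ (positions : List Int) (top bottom : Int),
      0 ≤ top → top ≤ bottom + 1 → bottom + 1 ≤ (cs.length : Int) →
      pyCpmLoop (pyInverse (pyLastToFirst cs)) (PySem.List.sorted cs (fun c => c) false)
          pat positions top bottom
        = (altPatLoop (occB cs) (firstB cs) pat positions top bottom).2
          - (altPatLoop (occB cs) (firstB cs) pat positions top bottom).1 + 1 := by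
  intro positions
  induction positions with
  | nil =>
    intro top bottom _ _ _
    simp [pyCpmLoop, altPatLoop]
  | cons pos rest ih =>
    intro top bottom h0 h1 h2
    simp only [pyCpmLoop, altPatLoop]
    set c := PySem.List.pyGetD pat pos ' ' with hc
    set a := top.toNat with hadef
    set b := (bottom + 1).toNat with hbdef
    have hab : a ≤ b := by omega
    have hbn : b ≤ cs.length := by omega
    set s := ltcN cs c + cntTake cs c a with hsdef
    set k := cntTake cs c b - cntTake cs c a with hkdef
    have hcmono : cntTake cs c a ≤ cntTake cs c b := cnt_take_mono cs c hab
    -- A-side candidates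
    have hcand : (PySem.List.slice (pyInverse (pyLastToFirst cs)) (some top) (some (bottom + 1))).filter
        (fun x => PySem.List.pyGetD (PySem.List.sorted cs (fun c => c) false) x ' ' == c)
        = (List.range' s k).map (fun (j : Nat) => (j : Int)) := by
      rw [fperm_eq cs hdom, PySem.List.slice_toNat _ h0 (by omega)]
      rw [← List.map_drop, ← List.map_take, drop_take_range cs.length a (b - a) (by omega)]
      rw [List.filter_map]
      have hfc : (List.range' a (b - a)).filter
          ((fun x => PySem.List.pyGetD (PySem.List.sorted cs (fun c => c) false) x ' ' == c)
            ∘ (fun j => ((rkN cs j : Nat) : Int)))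
          = (List.range' a (b - a)).filter (fun j => cs.getD j ' ' == c) := by
        apply List.filter_congr
        intro j hj
        obtain ⟨i, hilt, rfl⟩ := List.mem_range'.mp hj
        have hjn : a + 1 * i < cs.length := by omega
        have hcjmem : cs.getD (a + 1 * i) ' ' ∈ cs := by
          rw [List.getD_eq_getElem _ _ hjn]; exact List.getElem_mem hjn
        simp only [Function.comp, PySem.List.pyGetD_natCast, schars_eq cs hdom]
        rw [show (schrL cs).getD (rkN cs (a + 1 * i)) ' ' = cs.getD (a + 1 * i) ' ' from by
          rw [rkN]
          exact schr_getD cs hdom (hdom _ hcjmem) (cnt_take_lt_count cs hjn rfl)]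
      rw [hfc]
      have hcr := cand_range cs c (b - a) a (by omega)
      rw [show a + (b - a) = b by omega] at hcr
      have hmapr : ((List.range' a (b - a)).filter (fun j => cs.getD j ' ' == c)).map
          (fun j => ((rkN cs j : Nat) : Int))
          = (((List.range' a (b - a)).filter (fun j => cs.getD j ' ' == c)).map
              (fun j => ltcN cs c + cntTake cs c j)).map (fun (j : Nat) => (j : Int)) := by
        rw [List.map_map]
        apply List.map_congr_left
        intro j hj
        have hjeq : cs.getD j ' ' = c := beq_iff_eq.mp ((List.mem_filter.mp hj).2)
        simp only [Function.comp, rkN, hjeq]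
      rw [hmapr, hcr]
    rw [hcand]
    by_cases hmem : c ∈ cs
    · rw [if_pos ((occB_contains cs c).mpr hmem)]
      have htopn : top ≤ (cs.length : Int) := by omega
      have hlo : altBisect ((occB cs).getD c []) top = (cntTake cs c a : Int) := by
        rw [occB_getD]
        exact bisect_idxs cs c top h0 htopn
      have hhi : altBisect ((occB cs).getD c []) (bottom + 1) = (cntTake cs c b : Int) := by
        rw [occB_getD]
        exact bisect_idxs cs c (bottom + 1) (by omega) h2
      rw [hlo, hhi]
      by_cases hk : k = 0
      · have hket : (cntTake cs c b : Int) ≤ (cntTake cs c a : Int) := by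
          have : cntTake cs c b ≤ cntTake cs c a := by omega
          exact_mod_cast this
        rw [show (List.range' s k).map (fun (j : Nat) => (j : Int)) = [] from by
          rw [hk]; simp]
        rw [if_pos hket]
        simp
      · have hklt : ¬ ((cntTake cs c b : Int) ≤ (cntTake cs c a : Int)) := by
          have : cntTake cs c a < cntTake cs c b := by omega
          omega
        rw [if_neg hklt]
        have hne : ¬ ((List.range' s k).map (fun (j : Nat) => (j : Int))).isEmpty = true := by
          simp [List.isEmpty_iff]
          omega
        rw [if_neg hne]
        have hkpos : 0 < k := by omega
        rw [min_range'_cast s k hkpos, max_range'_cast s k hkpos]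
        simp only [Option.getD_some]
        rw [firstB_getD cs c hmem]
        have he1 : ((s : Nat) : Int) = (ltcN cs c : Int) + (cntTake cs c a : Int) := by
          rw [hsdef]; push_cast; ring
        have he2 : (((s + k - 1 : Nat)) : Int)
            = (ltcN cs c : Int) + (cntTake cs c b : Int) - 1 := by
          rw [hsdef, hkdef]
          omega
        rw [he1, he2]
        refine ih ((ltcN cs c : Int) + (cntTake cs c a : Int))
          ((ltcN cs c : Int) + (cntTake cs c b : Int) - 1) (by omega) (by omega) ?_
        have hlim : ltcN cs c + cs.count c ≤ cs.length := ltc_add_count_le cs c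
        have hcntb : cntTake cs c b ≤ cs.count c := cnt_take_le_count cs c b
        omega
    · have hcount : cs.count c = 0 := List.count_eq_zero.mpr hmem
      have hk0 : k = 0 := by
        have := cnt_take_le_count cs c b
        omega
      rw [show (List.range' s k).map (fun (j : Nat) => (j : Int)) = [] from by
        rw [hk0]; simp]
      rw [if_neg (show ¬ (occB cs).contains c = true from
        fun hcontains => hmem ((occB_contains cs c).mp hcontains))]
      simp

-- ===== VERDICT (by name: the statement is the Claim_ definition above) =====
theorem count_patterns_in_bwt_spec : Claim_equal_count_patterns_in_bwt := by
  intro bwt patterns hdomAll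
  unfold Spec_count_patterns_in_bwt
  have hdom : ∀ c ∈ bwt.toList, pvDomChar c = true := by
    unfold Dom_count_patterns_in_bwt at hdomAll
    rw [Bool.and_eq_true] at hdomAll
    have h1 := hdomAll.1
    unfold pvDomStr at h1
    exact List.all_eq_true.mp h1
  unfold count_patterns_in_bwt count_patterns_in_bwt_alt
  dsimp only
  rw [show (List.foldl (fun d i => d.modify (PySem.List.pyGetD bwt.toList i ' ') [] fun l => l ++ [i])
      PySem.Dict.empty (PySem.List.pyRange 0 (PySem.List.len bwt.toList))) = occB bwt.toList from rfl]
  rw [show (List.foldl (fun (p : PySem.Dict Char Int × Int) ch =>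
      (p.1.insert ch p.2, p.2 + PySem.List.len ((occB bwt.toList).getD ch [])))
      (PySem.Dict.empty, 0) (PySem.List.sorted (occB bwt.toList).keys fun c => c)).1
      = firstB bwt.toList from rfl]
  rw [PySem.List.foldl_append_singleton_eq_map
    (f := fun p : String => pyCountPatternMatches p.toList (pyInverse (pyLastToFirst bwt.toList))
      (PySem.List.sorted bwt.toList (fun c => c) false))]
  rw [PySem.List.foldl_append_singleton_eq_map
    (f := fun pat : String =>
      (altPatLoop (occB bwt.toList) (firstB bwt.toList) pat.toList
          (PySem.List.pyRange (PySem.List.len pat.toList - 1) (-1) (-1)) 0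
          (PySem.List.len bwt.toList - 1)).2
        - (altPatLoop (occB bwt.toList) (firstB bwt.toList) pat.toList
            (PySem.List.pyRange (PySem.List.len pat.toList - 1) (-1) (-1)) 0
            (PySem.List.len bwt.toList - 1)).1 + 1)]
  rw [List.nil_append, List.nil_append]
  apply List.map_congr_left
  intro p _
  have hlenF : PySem.List.len (pyInverse (pyLastToFirst bwt.toList)) = (bwt.toList.length : Int) := by
    rw [fperm_eq _ hdom, PySem.List.len_eq, List.length_map, List.length_range]
  rw [pyCountPatternMatches, hlenF, PySem.List.len_eq]
  exact loop_eq bwt.toList hdom p.toList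
    (PySem.List.pyRange (PySem.List.len p.toList - 1) (-1) (-1)) 0 ((bwt.toList.length : Int) - 1)
    (by omega) (by omega) (by omega)
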